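-- pv_equiv track=rewrite | github.com/jarosser06/ratio | rto/commands/navigation.py | convert_permissions
-- ===== SOURCE A (Python) =====
-- def convert_permissions(perm_str, is_directory):
--     """
--     Convert numeric permissions to string format (like -rwxr-xr-x)
--
--     Keyword arguments:
--     perm_str -- The permission string to convert
--     is_directory -- Whether the file is a directory
--     """
--     if not perm_str or len(perm_str) != 3:
--         return "???????????"
--
--     result = "d" if is_directory else "-"
--
--     # Convert each digit to rwx format
--     mapping = {
--         "0": "---", "1": "--x", "2": "-w-", "3": "-wx",
--         "4": "r--", "5": "r-x", "6": "rw-", "7": "rwx"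
--     }
--
--     for digit in perm_str:
--         if digit in mapping:
--             result += mapping[digit]
--
--         else:
--             result += "???"
--
--     return result
-- ===== SOURCE B (Python) =====
-- def convert_permissions(perm_str, is_directory):
--     if not perm_str or len(perm_str) != 3:
--         return "???????????"
--     parts = ["d" if is_directory else "-"]
--     for ch in perm_str:
--         if '0' <= ch <= '7':
--             d = ord(ch) - 48
--             parts.append(('r' if d & 4 else '-') + ('w' if d & 2 else '-') + ('x' if d & 1 else '-'))
--         else:
--             parts.append("???")
--     return "".join(parts)
-- ===== Notes on version B (the rewrite author's own statement) =====
-- stated objective: idiomatic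
-- what changed: Each digit's rwx triple is derived from its three permission bits (d&4,d&2,d&1) instead of being read from a static 8-entry lookup table.
import Mathlib
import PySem

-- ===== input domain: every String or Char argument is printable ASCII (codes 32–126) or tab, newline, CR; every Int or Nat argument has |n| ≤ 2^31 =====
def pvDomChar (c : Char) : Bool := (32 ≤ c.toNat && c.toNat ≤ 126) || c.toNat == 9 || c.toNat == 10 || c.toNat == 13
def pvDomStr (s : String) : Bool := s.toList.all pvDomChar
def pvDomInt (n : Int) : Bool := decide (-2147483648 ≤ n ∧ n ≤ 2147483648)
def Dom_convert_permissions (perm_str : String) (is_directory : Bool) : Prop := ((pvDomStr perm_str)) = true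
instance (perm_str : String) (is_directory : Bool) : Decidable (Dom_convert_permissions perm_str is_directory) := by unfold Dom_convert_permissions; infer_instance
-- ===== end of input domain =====

-- B derives each digit's rwx triple from its three permission bits (d&4, d&2, d&1)
-- instead of reading a static 8-entry lookup table; same cost, more idiomatic.

-- ===== PORT A =====
-- the `mapping` dict literal of A (keys are the 1-char strings A iterates over, ported as Char)
def pvMapA : PySem.Dict Char (List Char) :=
  PySem.Dict.ofList
    [('0', ['-','-','-']), ('1', ['-','-','x']), ('2', ['-','w','-']), ('3', ['-','w','x']),
     ('4', ['r','-','-']), ('5', ['r','-','x']), ('6', ['r','w','-']), ('7', ['r','w','x'])]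

def convert_permissions (perm_str : String) (is_directory : Bool) : String :=
  if perm_str.toList = [] ∨ PySem.Str.len perm_str ≠ 3 then "???????????"
  else
    String.mk (perm_str.toList.foldl
      (fun r digit =>
        match pvMapA.get? digit with
        | some v => r ++ v
        | none => r ++ ['?','?','?'])
      (if is_directory then ['d'] else ['-']))

-- ===== PORT B =====
-- the body of B's loop: triple from the three permission bits, '???' for non-octal chars
def pvBitsB (c : Char) : List Char :=
  if '0' ≤ c ∧ c ≤ '7' then
    let d := c.toNat - 48
    [(if d &&& 4 ≠ 0 then 'r' else '-'),
     (if d &&& 2 ≠ 0 then 'w' else '-'),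
     (if d &&& 1 ≠ 0 then 'x' else '-')]
  else ['?','?','?']

def convert_permissions_alt (perm_str : String) (is_directory : Bool) : String :=
  if perm_str.toList = [] ∨ PySem.Str.len perm_str ≠ 3 then "???????????"
  else
    let parts : List (List Char) :=
      perm_str.toList.foldl (fun ps c => ps ++ [pvBitsB c])
        [if is_directory then ['d'] else ['-']]
    String.mk (PySem.Chars.join [] parts)

-- ===== PRECONDITION & SPEC =====
def Spec_convert_permissions (perm_str : String) (is_directory : Bool) (out : String) : Prop := out = convert_permissions_alt perm_str is_directory
instance (perm_str : String) (is_directory : Bool) (out : String) : Decidable (Spec_convert_permissions perm_str is_directory out) := by unfold Spec_convert_permissions; infer_instance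

-- ===== CLAIM (what is proved, stated in full; the proofs are below) =====
def Claim_equal_convert_permissions : Prop := ∀ (perm_str : String) (is_directory : Bool), Dom_convert_permissions perm_str is_directory → Spec_convert_permissions perm_str is_directory (convert_permissions perm_str is_directory)

-- ===== LEMMAS AND PROOFS =====

theorem pv_char_eq_of_toNat (c : Char) (n : Nat) (h : c.toNat = n) : c = Char.ofNat n := by
  have := Char.ofNat_toNat c; rw [h] at this; exact this.symm

-- A's per-char table lookup agrees with B's per-char bit computation
theorem pv_step_eq (c : Char) :
    (match pvMapA.get? c with
     | some v => v
     | none => ['?','?','?']) = pvBitsB c := by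
  by_cases h0 : c = '0'; · subst h0; decide
  by_cases h1 : c = '1'; · subst h1; decide
  by_cases h2 : c = '2'; · subst h2; decide
  by_cases h3 : c = '3'; · subst h3; decide
  by_cases h4 : c = '4'; · subst h4; decide
  by_cases h5 : c = '5'; · subst h5; decide
  by_cases h6 : c = '6'; · subst h6; decide
  by_cases h7 : c = '7'; · subst h7; decide
  have hrange : ¬ ('0' ≤ c ∧ c ≤ '7') := by
    rintro ⟨hl, hr⟩
    rw [Char.le_def, UInt32.le_iff_toNat_le] at hl hr
    have hl' : 48 ≤ c.toNat := hl
    have hr' : c.toNat ≤ 55 := hr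
    have : c.toNat = 48 ∨ c.toNat = 49 ∨ c.toNat = 50 ∨ c.toNat = 51 ∨
        c.toNat = 52 ∨ c.toNat = 53 ∨ c.toNat = 54 ∨ c.toNat = 55 := by omega
    rcases this with h | h | h | h | h | h | h | h <;>
      first
      | exact h0 (pv_char_eq_of_toNat c 48 h)
      | exact h1 (pv_char_eq_of_toNat c 49 h)
      | exact h2 (pv_char_eq_of_toNat c 50 h)
      | exact h3 (pv_char_eq_of_toNat c 51 h)
      | exact h4 (pv_char_eq_of_toNat c 52 h)
      | exact h5 (pv_char_eq_of_toNat c 53 h)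
      | exact h6 (pv_char_eq_of_toNat c 54 h)
      | exact h7 (pv_char_eq_of_toNat c 55 h)
  have hnone : pvMapA.get? c = none := by
    have hmk : pvMapA = PySem.Dict.mk
        [('0', ['-','-','-']), ('1', ['-','-','x']), ('2', ['-','w','-']), ('3', ['-','w','x']),
         ('4', ['r','-','-']), ('5', ['r','-','x']), ('6', ['r','w','-']), ('7', ['r','w','x'])] := by
      decide
    rw [hmk]
    simp only [PySem.Dict.get?_mk_cons]
    split_ifs with e0 e1 e2 e3 e4 e5 e6 e7
    · exact h0 (eq_of_beq e0).symm
    · exact h1 (eq_of_beq e1).symm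
    · exact h2 (eq_of_beq e2).symm
    · exact h3 (eq_of_beq e3).symm
    · exact h4 (eq_of_beq e4).symm
    · exact h5 (eq_of_beq e5).symm
    · exact h6 (eq_of_beq e6).symm
    · exact h7 (eq_of_beq e7).symm
    · rfl
  rw [hnone]
  simp [pvBitsB, hrange]

-- A's accumulating fold, characterised
theorem pv_foldA (l : List Char) (acc : List Char) :
    l.foldl (fun r digit =>
        match pvMapA.get? digit with
        | some v => r ++ v
        | none => r ++ ['?','?','?']) acc
      = acc ++ (l.map pvBitsB).flatten := by
  induction l generalizing acc with
  | nil => simp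
  | cons c l ih =>
    simp only [List.foldl_cons, List.map_cons, List.flatten_cons, ih]
    have := pv_step_eq c
    cases hm : pvMapA.get? c with
    | some v => rw [hm] at this; simp at this; simp [this, List.append_assoc]
    | none => rw [hm] at this; simp at this; simp [this, List.append_assoc]

-- joining parts with the empty separator is flattening
theorem pv_join_empty (parts : List (List Char)) :
    PySem.Chars.join ([] : List Char) parts = parts.flatten := by
  induction parts with
  | nil => simp [PySem.Chars.join_nil]
  | cons a rest ih =>
    cases rest with
    | nil => simp [PySem.Chars.join_singleton]
    | cons b r =>
      rw [PySem.Chars.join_cons_cons]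
      simp [ih]

-- ===== VERDICT (by name: the statement is the Claim_ definition above) =====
theorem convert_permissions_spec : Claim_equal_convert_permissions := by
  intro perm_str is_directory _
  unfold Spec_convert_permissions convert_permissions convert_permissions_alt
  split
  · rfl
  · rw [PySem.List.foldl_append_singleton_eq_map, pv_foldA]
    simp [pv_join_empty]
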